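-- pv_equiv track=rewrite | github.com/egeulgen/Bioinformatics_Textbook_Track | solutions/BA9K.py | LastToFirst
-- ===== SOURCE A (Python) =====
-- def LastToFirst(BWT, i):
--     counts = {}
--     BWT_list = []
--     for char in BWT:
--         if char not in counts.keys():
--             counts[char] = 1
--         else:
--             counts[char] += 1
--         tmp = char + str(counts[char])
--         BWT_list.append(tmp)
--
--     first_col = sorted(BWT_list, key=lambda x: x[0])
--
--     last_to_first = []
--     for sym_last in BWT_list:
--         for idx, sym_first in enumerate(first_col):
--             if sym_first == sym_last:
--                 last_to_first.append(idx)
--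
--     return last_to_first[i]
-- ===== SOURCE B (Python) =====
-- def LastToFirst(BWT, i):
--     # LF-mapping in one pass: position in the first column = (# characters
--     # smaller than BWT[j]) + (occurrence rank of BWT[j] among its equals before j).
--     n = len(BWT)
--     j = i if i >= 0 else i + n
--     c = BWT[j]
--     smaller = 0
--     rank = 0
--     for k in range(n):
--         ch = BWT[k]
--         if ch < c:
--             smaller += 1
--         elif ch == c and k < j:
--             rank += 1
--     return smaller + rank
-- ===== Notes on version B (the rewrite author's own statement) =====
-- stated objective: faster
-- what changed: Replaces building the rank-tagged symbol list, sorting it and linearly scanning the whole first column for every symbol with the closed-form LF map: one counting pass giving (#chars smaller than BWT[j]) + (occurrence rank of BWT[j] before position j).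
import Mathlib
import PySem

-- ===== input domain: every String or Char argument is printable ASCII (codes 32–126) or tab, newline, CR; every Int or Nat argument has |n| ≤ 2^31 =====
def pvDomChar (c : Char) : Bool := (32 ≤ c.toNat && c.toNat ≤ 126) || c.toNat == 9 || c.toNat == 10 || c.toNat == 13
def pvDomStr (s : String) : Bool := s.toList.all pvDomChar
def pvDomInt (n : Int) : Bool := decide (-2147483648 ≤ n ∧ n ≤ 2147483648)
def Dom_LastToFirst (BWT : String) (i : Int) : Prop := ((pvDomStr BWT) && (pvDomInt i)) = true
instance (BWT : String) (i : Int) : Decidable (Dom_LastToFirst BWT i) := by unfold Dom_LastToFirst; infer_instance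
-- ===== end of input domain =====

-- B replaces A's tag-sort-and-scan (quadratic) by the one-pass LF-map count:
-- (# characters smaller than BWT[j]) + (occurrence rank of BWT[j] before j).


-- ===== PORT A =====
-- key=lambda x: x[0]  (every BWT_list element is nonempty: a char followed by digits)
def pvKey (x : List Char) : Char := PySem.List.pyGetD x 0 ' '

def LastToFirst (BWT : String) (i : Int) : Int :=
  -- first loop: counts dict + BWT_list (tmp = char + str(counts[char]), kept as its char list — exact)
  let st := BWT.toList.foldl
    (fun (s : PySem.Dict Char Int × List (List Char)) (ch : Char) =>
      let counts := if s.1.contains ch = false then s.1.insert ch 1 else s.1.modify ch 0 (· + 1)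
      (counts, s.2 ++ [ch :: PySem.Int.toChars (counts.getD ch 0)]))
    (PySem.Dict.empty, [])
  let BWT_list := st.2
  let first_col := PySem.List.sorted BWT_list pvKey
  -- nested loops: for sym_last in BWT_list: for idx, sym_first in enumerate(first_col): …
  let last_to_first := BWT_list.foldl
    (fun acc sym_last =>
      (PySem.List.enumerate first_col).foldl
        (fun acc2 p => if p.2 = sym_last then acc2 ++ [p.1] else acc2) acc)
    []
  PySem.List.pyGetD last_to_first i 0   -- last_to_first[i]; IndexError excluded by Pre_

-- ===== PORT B =====
def LastToFirst_alt (BWT : String) (i : Int) : Int :=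
  let L := BWT.toList
  let n : Int := (L.length : Int)       -- n = len(BWT)
  let j := if 0 ≤ i then i else i + n   -- j = i if i >= 0 else i + n
  let c := PySem.List.pyGetD L j ' '    -- c = BWT[j]; IndexError excluded by Pre_
  let st := (PySem.List.pyRange 0 n 1).foldl
    (fun (s : Int × Int) k =>
      let ch := PySem.List.pyGetD L k ' '   -- ch = BWT[k], k in range(n)
      if ch < c then (s.1 + 1, s.2)
      else if ch = c ∧ k < j then (s.1, s.2 + 1) else s)
    (0, 0)
  st.1 + st.2                           -- smaller + rank

-- ===== PRECONDITION & SPEC =====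
-- A raises IndexError on last_to_first[i] (a list of length len(BWT)) unless -len(BWT) <= i < len(BWT).
def Pre_LastToFirst (BWT : String) (i : Int) : Prop := PySem.Raise.InRange BWT.toList.length i
instance (BWT : String) (i : Int) : Decidable (Pre_LastToFirst BWT i) := by
  unfold Pre_LastToFirst PySem.Raise.InRange; infer_instance
def pvWitness_LastToFirst : String × Int := ("banana", -2)

def Spec_LastToFirst (BWT : String) (i : Int) (out : Int) : Prop := out = LastToFirst_alt BWT i
instance (BWT : String) (i : Int) (out : Int) : Decidable (Spec_LastToFirst BWT i out) := by
  unfold Spec_LastToFirst; infer_instance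

-- ===== CLAIM (what is proved, stated in full; the proofs are below) =====
def Claim_equal_LastToFirst : Prop := ∀ (BWT : String) (i : Int), Dom_LastToFirst BWT i → Pre_LastToFirst BWT i → Spec_LastToFirst BWT i (LastToFirst BWT i)

-- ===== LEMMAS AND PROOFS =====

theorem pvKey_cons (c : Char) (t : List Char) : pvKey (c :: t) = c := by
  simp [pvKey, PySem.List.pyGetD_zero]

def pvD (n : Nat) : List Char :=
  if h : n / 10 = 0 then [Nat.digitChar (n % 10)]
  else pvD (n / 10) ++ [Nat.digitChar (n % 10)]
decreasing_by exact Nat.div_lt_self (by omega) (by omega)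

def pvDec (l : List Char) : Nat := l.foldl (fun a c => a * 10 + (c.toNat - 48)) 0

theorem pv_toDigitsCore_eq (f : Nat) : ∀ (n : Nat) (acc : List Char), n < f →
    Nat.toDigitsCore 10 f n acc = pvD n ++ acc := by
  induction f with
  | zero => intro n acc h; omega
  | succ f ih =>
    intro n acc h
    rw [Nat.toDigitsCore]
    by_cases h10 : n / 10 = 0
    · simp [h10, pvD]
    · simp only [h10, if_false]
      rw [ih (n / 10) _ (by omega)]
      conv_rhs => rw [pvD]
      rw [dif_neg h10]
      simp

theorem pvDec_append (l : List Char) (ch : Char) :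
    pvDec (l ++ [ch]) = pvDec l * 10 + (ch.toNat - 48) := by
  simp [pvDec, List.foldl_append]

theorem pv_digitChar_toNat (d : Nat) (h : d < 10) : (Nat.digitChar d).toNat = 48 + d := by
  interval_cases d <;> rfl

theorem pvDec_pvD (n : Nat) : pvDec (pvD n) = n := by
  induction n using Nat.strong_induction_on with
  | _ n ih =>
    rw [pvD]
    by_cases h10 : n / 10 = 0
    · rw [dif_pos h10]
      have : n % 10 < 10 := Nat.mod_lt _ (by omega)
      simp [pvDec, pv_digitChar_toNat _ this]
      omega
    · rw [dif_neg h10]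
      rw [pvDec_append, ih (n / 10) (Nat.div_lt_self (by omega) (by omega))]
      have : n % 10 < 10 := Nat.mod_lt _ (by omega)
      rw [pv_digitChar_toNat _ this]
      omega

theorem pv_toChars_inj (a b : Nat) :
    PySem.Int.toChars (a : Int) = PySem.Int.toChars (b : Int) → a = b := by
  intro h
  simp only [PySem.Int.toChars] at h
  rw [if_neg (by omega), if_neg (by omega)] at h
  simp only [Int.toNat_natCast] at h
  unfold Nat.toDigits at h
  rw [pv_toDigitsCore_eq _ _ _ (by omega), pv_toDigitsCore_eq _ _ _ (by omega)] at h
  simp at h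
  have := pvDec_pvD a
  rw [h, pvDec_pvD] at this
  omega

def pvTag (L : List Char) (p : Char × Nat) : List Char :=
  p.1 :: PySem.Int.toChars (((L.take (p.2 + 1)).count p.1 : Nat) : Int)
def pvTags (L : List Char) : List (List Char) := L.zipIdx.map (pvTag L)

theorem pvTags_length (L : List Char) : (pvTags L).length = L.length := by
  simp [pvTags]

theorem pvTags_append (L : List Char) (a : Char) :
    pvTags (L ++ [a]) = pvTags L ++ [a :: PySem.Int.toChars ((L.count a + 1 : Nat) : Int)] := by
  unfold pvTags
  rw [List.zipIdx_append, List.map_append]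
  congr 1
  · apply List.map_congr_left
    intro p hp
    have h2 := List.snd_lt_add_of_mem_zipIdx hp
    unfold pvTag
    rw [List.take_append_of_le_length (by simp at h2 ⊢; omega)]
  · simp [pvTag, List.zipIdx]
    rw [List.take_of_length_le (by simp), List.count_append]
    simp

theorem pv_tags_filter (L : List Char) (c : Char) :
    (pvTags L).filter (fun x => decide (pvKey x = c)) =
      (List.range (L.count c)).map (fun t => c :: PySem.Int.toChars ((t + 1 : Nat) : Int)) := by
  induction L using List.reverseRecOn with
  | nil => simp [pvTags]
  | append_singleton L a ih =>
    rw [pvTags_append, List.filter_append, ih, List.count_append]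
    by_cases hac : a = c
    · subst hac
      simp [pvKey_cons, List.range_succ]
    · simp [pvKey_cons, hac]

theorem pv_tags_key_mem (L : List Char) : ∀ x ∈ pvTags L, pvKey x ∈ L := by
  intro x hx
  simp only [pvTags, List.mem_map] at hx
  obtain ⟨p, hp, rfl⟩ := hx
  have := List.fst_mem_of_mem_zipIdx hp
  simpa [pvTag, pvKey_cons] using this

def pvStepA (s : PySem.Dict Char Int × List (List Char)) (ch : Char) :
    PySem.Dict Char Int × List (List Char) :=
  let counts := if s.1.contains ch = false then s.1.insert ch 1 else s.1.modify ch 0 (· + 1)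
  (counts, s.2 ++ [ch :: PySem.Int.toChars (counts.getD ch 0)])

set_option maxRecDepth 4096 in
theorem pv_foldA_inv (L : List Char) :
    (∀ v, (L.foldl pvStepA (PySem.Dict.empty, [])).1.getD v 0 = ((L.count v : Nat) : Int)
        ∧ ((L.foldl pvStepA (PySem.Dict.empty, [])).1.contains v = true ↔ v ∈ L))
    ∧ (L.foldl pvStepA (PySem.Dict.empty, [])).2 = pvTags L := by
  induction L using List.reverseRecOn with
  | nil => simp [pvTags, PySem.Dict.getD_empty, PySem.Dict.contains_empty]
  | append_singleton L a ih =>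
    obtain ⟨ihd, iht⟩ := ih
    rw [List.foldl_append]
    simp only [List.foldl_cons, List.foldl_nil]
    set st := L.foldl pvStepA (PySem.Dict.empty, []) with hst
    show (∀ v, (pvStepA st a).1.getD v 0 = _ ∧ ((pvStepA st a).1.contains v = true ↔ _))
        ∧ (pvStepA st a).2 = _
    unfold pvStepA
    by_cases hc : st.1.contains a = false
    · -- fresh char: a ∉ L
      have hnotmem : a ∉ L := by
        intro hmem
        rw [← (ihd a).2] at hmem
        rw [hc] at hmem; exact Bool.false_ne_true hmem
      constructor
      · intro v
        simp only [hc, if_true]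
        constructor
        · rw [PySem.Dict.getD_insert]
          by_cases hv : v = a
          · subst hv
            simp [List.count_append, List.count_eq_zero_of_not_mem hnotmem]
          · simp [hv, (ihd v).1, List.count_append, Ne.symm hv]
        · rw [PySem.Dict.contains_insert]
          simp only [Bool.or_eq_true, beq_iff_eq, (ihd v).2, List.mem_append,
            List.mem_singleton]
          tauto
      · simp only [hc, if_true]
        rw [iht, pvTags_append]
        rw [PySem.Dict.getD_insert_self]
        congr 3
        simp [List.count_eq_zero_of_not_mem hnotmem]
    · -- seen char
      have hc' : st.1.contains a = true := by revert hc; cases st.1.contains a <;> simp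
      constructor
      · intro v
        simp only [hc', Bool.true_eq_false, if_false]
        constructor
        · rw [PySem.Dict.getD_modify]
          by_cases hv : v = a
          · subst hv
            rw [if_pos rfl, (ihd v).1, List.count_append]
            push_cast
            simp
          · simp [hv, (ihd v).1, List.count_append, Ne.symm hv]
        · rw [PySem.Dict.contains_modify]
          simp only [Bool.or_eq_true, beq_iff_eq, (ihd v).2, List.mem_append,
            List.mem_singleton]
          tauto
      · simp only [hc', Bool.true_eq_false, if_false]
        rw [iht, pvTags_append]
        rw [PySem.Dict.getD_modify_self, (ihd a).1]
        congr 3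

theorem pv_foldA (L : List Char) :
    (L.foldl
      (fun (s : PySem.Dict Char Int × List (List Char)) (ch : Char) =>
        let counts := if s.1.contains ch = false then s.1.insert ch 1 else s.1.modify ch 0 (· + 1)
        (counts, s.2 ++ [ch :: PySem.Int.toChars (counts.getD ch 0)]))
      (PySem.Dict.empty, [])).2 = pvTags L := (pv_foldA_inv L).2

theorem pv_insertBy_cons {α : Type} (before : α → α → Bool) (x y : α) (ys : List α) :
    PySem.List.insertBy before x (y :: ys) =
      if before x y then x :: y :: ys else y :: PySem.List.insertBy before x ys := rfl

theorem pv_insertBy_append_not {α : Type} (before : α → α → Bool) (x : α) (A B : List α)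
    (h : ∀ a ∈ A, before x a = false) :
    PySem.List.insertBy before x (A ++ B) = A ++ PySem.List.insertBy before x B := by
  induction A with
  | nil => simp
  | cons a A ih =>
    rw [List.cons_append, pv_insertBy_cons, if_neg (by simp [h a (by simp)]),
      ih (fun a' ha' => h a' (by simp [ha']))]
    simp

theorem pv_insertBy_all_before {α : Type} (before : α → α → Bool) (x : α) (B : List α)
    (h : ∀ a ∈ B, before x a = true) :
    PySem.List.insertBy before x B = x :: B := by
  cases B with
  | nil => rfl
  | cons b B => rw [pv_insertBy_cons, if_pos (h b (by simp))]

theorem pv_insert_group (T : List (List Char)) (x : List Char) (U V : List Char)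
    (hU : ∀ u ∈ U, u < pvKey x) (hV : ∀ v ∈ V, pvKey x < v) :
    PySem.List.insertBy (fun a b => decide (pvKey a < pvKey b)) x
      ((U ++ pvKey x :: V).flatMap (fun c => T.filter (fun y => decide (pvKey y = c)))) =
    (U ++ pvKey x :: V).flatMap (fun c => (T ++ [x]).filter (fun y => decide (pvKey y = c))) := by
  have hkeyF : ∀ c, ∀ y ∈ T.filter (fun y => decide (pvKey y = c)), pvKey y = c := by
    intro c y hy
    have := List.of_mem_filter hy
    simpa using this
  have hG : ∀ c, (T ++ [x]).filter (fun y => decide (pvKey y = c)) =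
      T.filter (fun y => decide (pvKey y = c)) ++ (if pvKey x = c then [x] else []) := by
    intro c
    rw [List.filter_append]
    congr 1
    by_cases h : pvKey x = c <;> simp [h]
  have e2 : (U ++ pvKey x :: V).flatMap (fun c => (T ++ [x]).filter (fun y => decide (pvKey y = c)))
      = (U.flatMap (fun c => T.filter (fun y => decide (pvKey y = c)))
          ++ T.filter (fun y => decide (pvKey y = pvKey x)))
        ++ (x :: V.flatMap (fun c => T.filter (fun y => decide (pvKey y = c)))) := by
    rw [List.flatMap_append, List.flatMap_cons]
    rw [List.flatMap_congr (l := U) (g := fun c => T.filter (fun y => decide (pvKey y = c)))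
      (by intro u hu; rw [hG u, if_neg (by exact fun h => absurd (h ▸ hU u hu) (lt_irrefl _)), List.append_nil])]
    rw [List.flatMap_congr (l := V) (g := fun c => T.filter (fun y => decide (pvKey y = c)))
      (by intro v hv; rw [hG v, if_neg (by exact fun h => absurd (h ▸ hV v hv) (lt_irrefl _)), List.append_nil])]
    rw [hG (pvKey x), if_pos rfl]
    simp
  have e1 : (U ++ pvKey x :: V).flatMap (fun c => T.filter (fun y => decide (pvKey y = c)))
      = (U.flatMap (fun c => T.filter (fun y => decide (pvKey y = c)))
          ++ T.filter (fun y => decide (pvKey y = pvKey x)))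
        ++ V.flatMap (fun c => T.filter (fun y => decide (pvKey y = c))) := by
    rw [List.flatMap_append, List.flatMap_cons, List.append_assoc]
  rw [e1, e2]
  rw [pv_insertBy_append_not]
  · congr 1
    apply pv_insertBy_all_before
    intro a ha
    rw [List.mem_flatMap] at ha
    obtain ⟨v, hv, hav⟩ := ha
    have := hkeyF v a hav
    simp only [this, decide_eq_true_eq]
    exact hV v hv
  · intro a ha
    rw [List.mem_append] at ha
    rcases ha with ha | ha
    · rw [List.mem_flatMap] at ha
      obtain ⟨u, hu, hau⟩ := ha
      have := hkeyF u a hau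
      simp only [this, decide_eq_false_iff_not, not_lt]
      exact le_of_lt (hU u hu)
    · have := hkeyF (pvKey x) a ha
      simp only [this, decide_eq_false_iff_not]
      exact lt_irrefl _

theorem pv_sorted_eq_group (T : List (List Char)) (S : List Char)
    (hmem : ∀ x ∈ T, pvKey x ∈ S) (hS : S.Pairwise (· < ·)) :
    PySem.List.sorted T pvKey =
      S.flatMap (fun c => T.filter (fun x => decide (pvKey x = c))) := by
  rw [PySem.List.sorted_eq_foldl_insertBy]
  induction T using List.reverseRecOn with
  | nil => simp
  | append_singleton T x ih =>
    have hmemT : ∀ y ∈ T, pvKey y ∈ S := fun y hy => hmem y (by simp [hy])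
    rw [List.foldl_append, List.foldl_cons, List.foldl_nil, ih hmemT]
    have hx : pvKey x ∈ S := hmem x (by simp)
    obtain ⟨U, V, rfl⟩ := List.append_of_mem hx
    have hUV := hS
    rw [List.pairwise_append] at hUV
    obtain ⟨hUp, hV', hcross⟩ := hUV
    rw [List.pairwise_cons] at hV'
    exact pv_insert_group T x U V
      (fun u hu => hcross u hu (pvKey x) (by simp)) hV'.1

theorem pv_enum_filter_nomatch {α : Type} [DecidableEq α] (V : List α) (sym : α)
    (h : sym ∉ V) : ∀ (s : Int),
    (PySem.List.enumerate V s).filter (fun p => decide (p.2 = sym)) = [] := by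
  induction V with
  | nil => intro s; simp [PySem.List.enumerate]
  | cons v V ih =>
    intro s
    rw [PySem.List.enumerate_cons, List.filter_cons]
    have hv : v ≠ sym := by intro hh; exact h (by simp [hh])
    simp only [hv, decide_false]
    exact ih (fun hm => h (by simp [hm])) (s + 1)

theorem pv_enum_filter_singleton {α : Type} [DecidableEq α] (U : List α) :
    ∀ (V : List α) (sym : α) (s : Int), sym ∉ U → sym ∉ V →
    (PySem.List.enumerate (U ++ sym :: V) s).filter (fun p => decide (p.2 = sym)) =
      [(s + (U.length : Int), sym)] := by
  induction U with
  | nil =>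
    intro V sym s _ hV
    rw [List.nil_append, PySem.List.enumerate_cons, List.filter_cons]
    simp only [decide_eq_true_eq]
    rw [if_pos trivial, pv_enum_filter_nomatch V sym hV (s + 1)]
    simp
  | cons u U ih =>
    intro V sym s hU hV
    rw [List.cons_append, PySem.List.enumerate_cons, List.filter_cons]
    have hu : u ≠ sym := by intro hh; exact hU (by simp [hh])
    simp only [hu, decide_false]
    rw [ih V sym (s + 1) (fun hm => hU (by simp [hm])) hV]
    simp
    ring

theorem pv_countP_or {α : Type} (L : List α) (p q : α → Bool)
    (h : ∀ a ∈ L, ¬(p a = true ∧ q a = true)) :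
    L.countP (fun a => p a || q a) = L.countP p + L.countP q := by
  induction L with
  | nil => simp
  | cons a L ih =>
    rw [List.countP_cons, List.countP_cons, List.countP_cons,
      ih (fun b hb => h b (by simp [hb]))]
    have := h a (by simp)
    cases hp : p a <;> cases hq : q a <;> simp_all <;> omega

theorem pv_sum_count (S L : List Char) (hS : S.Nodup) :
    (S.map (fun c => L.count c)).sum = L.countP (fun a => decide (a ∈ S)) := by
  induction S with
  | nil => simp
  | cons s S ih =>
    rw [List.nodup_cons] at hS
    rw [List.map_cons, List.sum_cons, ih hS.2]
    have : L.countP (fun a => decide (a ∈ s :: S)) =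
        L.countP (fun a => decide (a = s) || decide (a ∈ S)) := by
      apply List.countP_congr
      intro a _
      simp
    rw [this, pv_countP_or]
    · have : L.count s = L.countP (fun a => decide (a = s)) := by
        rw [List.count]
        apply List.countP_congr
        intro a _
        rw [Bool.beq_eq_decide_eq]
      omega
    · intro a _
      simp only [decide_eq_true_eq]
      rintro ⟨rfl, hmem⟩
      exact hS.1 hmem

theorem pv_foldB (c : Char) (j : Int) (hj : 0 ≤ j) : ∀ (L : List Char),
    (PySem.List.pyRange 0 (L.length : Int) 1).foldl
      (fun (s : Int × Int) k =>
        let ch := PySem.List.pyGetD L k ' '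
        if ch < c then (s.1 + 1, s.2)
        else if ch = c ∧ k < j then (s.1, s.2 + 1) else s)
      (0, 0) =
      ((L.countP (fun a => decide (a < c)) : Int), (((L.take j.toNat).count c : Nat) : Int)) := by
  intro L
  induction L using List.reverseRecOn with
  | nil => simp
  | append_singleton L a ih =>
    have hlen : ((L ++ [a]).length : Int) = (L.length : Int) + 1 := by simp
    rw [hlen, PySem.List.pyRange_one_succ_right (by positivity), List.foldl_append]
    have hcongr : (PySem.List.pyRange 0 (L.length : Int) 1).foldl
        (fun (s : Int × Int) k =>
          let ch := PySem.List.pyGetD (L ++ [a]) k ' '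
          if ch < c then (s.1 + 1, s.2)
          else if ch = c ∧ k < j then (s.1, s.2 + 1) else s) (0, 0) =
        (PySem.List.pyRange 0 (L.length : Int) 1).foldl
        (fun (s : Int × Int) k =>
          let ch := PySem.List.pyGetD L k ' '
          if ch < c then (s.1 + 1, s.2)
          else if ch = c ∧ k < j then (s.1, s.2 + 1) else s) (0, 0) := by
      apply PySem.List.foldl_congr_mem
      intro s k hk
      rw [PySem.List.mem_pyRange_one] at hk
      have : PySem.List.pyGetD (L ++ [a]) k ' ' = PySem.List.pyGetD L k ' ' := by
        rw [PySem.List.pyGetD_eq_getElem _ _ hk.1 (by simp; omega),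
          PySem.List.pyGetD_eq_getElem _ _ hk.1 (by omega)]
        rw [List.getElem_append_left]
      simp only [this]
    rw [hcongr, ih]
    simp only [List.foldl_cons, List.foldl_nil]
    have hget : PySem.List.pyGetD (L ++ [a]) (L.length : Int) ' ' = a := by
      rw [PySem.List.pyGetD_natCast]
      simp
    rw [hget]
    have hcntP : (L ++ [a]).countP (fun x => decide (x < c)) =
        L.countP (fun x => decide (x < c)) + (if a < c then 1 else 0) := by
      rw [List.countP_append]
      by_cases h : a < c <;> simp [h]
    by_cases h1 : a < c
    · rw [if_pos h1]
      have htake : ((L ++ [a]).take j.toNat).count c = (L.take j.toNat).count c := by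
        by_cases hle : j.toNat ≤ L.length
        · rw [List.take_append_of_le_length hle]
        · rw [List.take_of_length_le (by simp; omega), List.take_of_length_le (by omega),
            List.count_append]
          have : a ≠ c := fun hh => absurd (hh ▸ h1) (lt_irrefl _)
          simp [this]
      rw [hcntP, if_pos h1, htake]
      simp
    · rw [if_neg h1]
      by_cases h2 : a = c ∧ ((L.length : Int)) < j
      · rw [if_pos h2]
        have htake : ((L ++ [a]).take j.toNat).count c = (L.take j.toNat).count c + 1 := by
          rw [List.take_of_length_le (by simp; omega), List.take_of_length_le (by omega),
            List.count_append]
          simp [h2.1]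
        rw [hcntP, if_neg h1, htake]
        simp
      · rw [if_neg h2]
        have htake : ((L ++ [a]).take j.toNat).count c = (L.take j.toNat).count c := by
          by_cases hle : j.toNat ≤ L.length
          · rw [List.take_append_of_le_length hle]
          · have hac : a ≠ c := by
              intro hh; exact h2 ⟨hh, by omega⟩
            rw [List.take_of_length_le (by simp; omega), List.take_of_length_le (by omega),
              List.count_append]
            simp [hac]
        rw [hcntP, if_neg h1, htake]
        simp


-- ---- the first column named, its nodup, and the index of each tag in it ----
def pvSC (L : List Char) : List Char := PySem.List.sorted (PySem.Set.ofList L) (fun x => x)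

def pvF (L : List Char) (c : Char) : List (List Char) :=
  (pvTags L).filter (fun x => decide (pvKey x = c))

theorem pv_FC_eq (L : List Char) :
    PySem.List.sorted (pvTags L) pvKey = (pvSC L).flatMap (pvF L) := by
  apply pv_sorted_eq_group
  · intro x hx
    rw [pvSC, PySem.List.mem_sorted, PySem.Set.mem_ofList]
    exact pv_tags_key_mem L x hx
  · exact PySem.List.sorted_ofList_pairwise_lt L

theorem pv_FC_nodup (L : List Char) : (PySem.List.sorted (pvTags L) pvKey).Nodup := by
  rw [pv_FC_eq, List.nodup_flatMap]
  constructor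
  · intro c _
    rw [pvF, pv_tags_filter]
    apply List.Nodup.map _ List.nodup_range
    intro a b hab
    have h2 : PySem.Int.toChars ((a + 1 : Nat) : Int) = PySem.Int.toChars ((b + 1 : Nat) : Int) := by
      injection hab
    have := pv_toChars_inj (a + 1) (b + 1) h2
    omega
  · apply (PySem.List.sorted_ofList_pairwise_lt L).imp
    intro c c' hlt y hy hy'
    rw [pvF, List.mem_filter] at hy hy'
    have h1 := hy.2
    have h2 := hy'.2
    simp only [decide_eq_true_eq] at h1 h2
    rw [h1] at h2
    exact absurd (h2 ▸ hlt) (lt_irrefl _)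

theorem pv_FC_split (L : List Char) (k : Nat) (hk : k < L.length) :
    ∃ W Z, PySem.List.sorted (pvTags L) pvKey = W ++ pvTag L (L[k], k) :: Z
      ∧ W.length = L.countP (fun a => decide (a < L[k])) + (L.take k).count L[k] := by
  have hcL : L[k] ∈ L := List.getElem_mem hk
  have hcSC : L[k] ∈ pvSC L := by
    rw [pvSC, PySem.List.mem_sorted, PySem.Set.mem_ofList]; exact hcL
  obtain ⟨U, V, hUV⟩ := List.append_of_mem hcSC
  have hpw : (pvSC L).Pairwise (· < ·) := PySem.List.sorted_ofList_pairwise_lt L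
  rw [hUV, List.pairwise_append] at hpw
  obtain ⟨hUpw, hV', hcross⟩ := hpw
  rw [List.pairwise_cons] at hV'
  have hUlt : ∀ u ∈ U, u < L[k] := fun u hu => hcross u hu (L[k]) (by simp)
  have hUnodup : U.Nodup := hUpw.imp ne_of_lt
  have hrank : (L.take (k + 1)).count L[k] = (L.take k).count L[k] + 1 := by
    rw [List.take_succ_eq_append_getElem hk, List.count_append]
    simp
  have hr1m : (L.take k).count L[k] + 1 ≤ L.count L[k] := by
    rw [← hrank]
    have hsub : (L.take (k + 1)).Sublist L := List.take_sublist _ _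
    exact hsub.count_le _
  have hblock : pvF L (L[k]) =
      (List.range (L.count L[k])).map (fun t => L[k] :: PySem.Int.toChars ((t + 1 : Nat) : Int)) := by
    rw [pvF, pv_tags_filter]
  have hltB : (L.take k).count L[k] <
      ((List.range (L.count L[k])).map (fun t => L[k] :: PySem.Int.toChars ((t + 1 : Nat) : Int))).length := by
    simp
    omega
  have hBat : ((List.range (L.count L[k])).map
      (fun t => L[k] :: PySem.Int.toChars ((t + 1 : Nat) : Int)))[(L.take k).count L[k]]'hltB =
      pvTag L (L[k], k) := by
    simp only [List.getElem_map, List.getElem_range]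
    rw [pvTag]
    simp only []
    rw [hrank]
  have hBdec : (List.range (L.count L[k])).map (fun t => L[k] :: PySem.Int.toChars ((t + 1 : Nat) : Int)) =
      ((List.range (L.count L[k])).map (fun t => L[k] :: PySem.Int.toChars ((t + 1 : Nat) : Int))).take
        ((L.take k).count L[k])
      ++ pvTag L (L[k], k) ::
        ((List.range (L.count L[k])).map (fun t => L[k] :: PySem.Int.toChars ((t + 1 : Nat) : Int))).drop
          ((L.take k).count L[k] + 1) := by
    conv_lhs => rw [← List.take_append_drop ((L.take k).count L[k])
      ((List.range (L.count L[k])).map (fun t => L[k] :: PySem.Int.toChars ((t + 1 : Nat) : Int)))]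
    rw [List.drop_eq_getElem_cons hltB, hBat]
  refine ⟨U.flatMap (pvF L)
      ++ ((List.range (L.count L[k])).map (fun t => L[k] :: PySem.Int.toChars ((t + 1 : Nat) : Int))).take
        ((L.take k).count L[k]),
    ((List.range (L.count L[k])).map (fun t => L[k] :: PySem.Int.toChars ((t + 1 : Nat) : Int))).drop
        ((L.take k).count L[k] + 1) ++ V.flatMap (pvF L), ?_, ?_⟩
  · rw [pv_FC_eq, hUV, List.flatMap_append, List.flatMap_cons, hblock]
    conv_lhs => rw [hBdec]
    simp [List.append_assoc]
  · rw [List.length_append, List.length_take]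
    have hflat : (U.flatMap (pvF L)).length = L.countP (fun a => decide (a < L[k])) := by
      rw [List.length_flatMap]
      have : (U.map (fun u => (pvF L u).length)).sum = (U.map (fun u => L.count u)).sum := by
        apply congrArg
        apply List.map_congr_left
        intro u _
        rw [pvF, pv_tags_filter]
        simp
      rw [this, pv_sum_count U L hUnodup]
      apply List.countP_congr
      intro a haL
      simp only [decide_eq_true_eq]
      constructor
      · intro haU
        exact hUlt a haU
      · intro halt
        have haSC : a ∈ pvSC L := by
          rw [pvSC, PySem.List.mem_sorted, PySem.Set.mem_ofList]; exact haL
        rw [hUV] at haSC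
        rcases List.mem_append.mp haSC with h | h
        · exact h
        · rcases List.mem_cons.mp h with h | h
          · exact absurd (h ▸ halt) (lt_irrefl _)
          · exact absurd (lt_trans halt (hV'.1 a h)) (lt_irrefl _)
    rw [hflat]
    simp
    omega

theorem pv_tags_getElem (L : List Char) (k : Nat) (hk : k < L.length) :
    (pvTags L)[k]'(by rw [pvTags_length]; exact hk) = pvTag L (L[k], k) := by
  simp [pvTags]

-- ---- the double loop of A ----
def pvG (L : List Char) (sym : List Char) : List Int :=
  ((PySem.List.enumerate (PySem.List.sorted (pvTags L) pvKey)).filter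
    (fun p => decide (p.2 = sym))).map Prod.fst

theorem pv_lastl_eq (L : List Char) :
    ((pvTags L).foldl
      (fun acc sym_last =>
        (PySem.List.enumerate (PySem.List.sorted (pvTags L) pvKey)).foldl
          (fun acc2 p => if p.2 = sym_last then acc2 ++ [p.1] else acc2) acc)
      []) = (pvTags L).flatMap (pvG L) := by
  simp only [PySem.List.foldl_append_ite (fun (p : Int × List Char) => p.2 = _) Prod.fst]
  rw [PySem.List.foldl_append_eq_flatMap, List.nil_append]
  rfl

theorem pv_g_singleton (L : List Char) (sym : List Char) (hsym : sym ∈ pvTags L) :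
    ∃ v, pvG L sym = [v] := by
  have hmemFC : sym ∈ PySem.List.sorted (pvTags L) pvKey :=
    (PySem.List.mem_sorted _ _ _ _).mpr hsym
  obtain ⟨U, V, hUV⟩ := List.append_of_mem hmemFC
  have hnd := pv_FC_nodup L
  rw [hUV] at hnd
  rw [List.nodup_append] at hnd
  obtain ⟨_, hndV, hdisj⟩ := hnd
  have hU : sym ∉ U := fun hmem => (hdisj sym hmem sym (by simp)) rfl
  have hV : sym ∉ V := (List.nodup_cons.mp hndV).1
  refine ⟨0 + (U.length : Int), ?_⟩
  rw [pvG, hUV, pv_enum_filter_singleton U V sym 0 hU hV]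
  simp

theorem pv_flat_singleton_len {α β : Type} (g : α → List β) :
    ∀ (T : List α), (∀ x ∈ T, ∃ v, g x = [v]) → (T.flatMap g).length = T.length := by
  intro T
  induction T with
  | nil => simp
  | cons x T ih =>
    intro h
    obtain ⟨v, hv⟩ := h x (by simp)
    rw [List.flatMap_cons, hv, List.length_append, ih (fun y hy => h y (by simp [hy]))]
    exact Nat.add_comm 1 T.length

theorem pv_lastl_len (L : List Char) :
    ((pvTags L).flatMap (pvG L)).length = L.length := by
  rw [pv_flat_singleton_len (pvG L) (pvTags L) (pv_g_singleton L), pvTags_length]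

theorem pv_lastl_at (L : List Char) (k : Nat) (hk : k < L.length) :
    ((pvTags L).flatMap (pvG L))[k]? =
      some ((L.countP (fun a => decide (a < L[k])) + (L.take k).count L[k] : Nat) : Int) := by
  have hkT : k < (pvTags L).length := by rw [pvTags_length]; exact hk
  obtain ⟨W, Z, hWZ, hWlen⟩ := pv_FC_split L k hk
  have hnd := pv_FC_nodup L
  rw [hWZ, List.nodup_append] at hnd
  obtain ⟨_, hndZ, hdisj⟩ := hnd
  have hW : pvTag L (L[k], k) ∉ W := fun hmem => (hdisj _ hmem _ (by simp)) rfl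
  have hZ : pvTag L (L[k], k) ∉ Z := (List.nodup_cons.mp hndZ).1
  have hgk : pvG L (pvTag L (L[k], k)) = [0 + (W.length : Int)] := by
    rw [pvG, hWZ, pv_enum_filter_singleton W Z _ 0 hW hZ]
    simp
  have hdecomp : pvTags L =
      (pvTags L).take k ++ pvTag L (L[k], k) :: (pvTags L).drop (k + 1) := by
    conv_lhs => rw [← List.take_append_drop k (pvTags L)]
    rw [List.drop_eq_getElem_cons hkT, pv_tags_getElem L k hk]
  have hpre : (((pvTags L).take k).flatMap (pvG L)).length = k := by
    rw [pv_flat_singleton_len (pvG L) _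
      (fun y hy => pv_g_singleton L y (List.mem_of_mem_take hy)), List.length_take]
    omega
  have e : (pvTags L).flatMap (pvG L) =
      ((pvTags L).take k).flatMap (pvG L)
        ++ ((0 + (W.length : Int)) :: ((pvTags L).drop (k + 1)).flatMap (pvG L)) := by
    conv_lhs => rw [hdecomp]
    rw [List.flatMap_append, List.flatMap_cons, hgk]
    simp
  rw [e, List.getElem?_append_right (by omega), hpre]
  simp only [Nat.sub_self, List.getElem?_cons_zero]
  congr 1
  rw [hWlen]
  push_cast
  ring

theorem pv_lastl_at' (L : List Char) (k : Nat) (hk : k < L.length)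
    (h : k < ((pvTags L).flatMap (pvG L)).length) :
    ((pvTags L).flatMap (pvG L))[k] =
      ((L.countP (fun a => decide (a < L[k])) + (L.take k).count L[k] : Nat) : Int) := by
  have hh := pv_lastl_at L k hk
  rw [List.getElem?_eq_getElem h] at hh
  exact Option.some.inj hh

-- ===== VERDICT (by name: the statement is the Claim_ definition above) =====
theorem LastToFirst_spec : Claim_equal_LastToFirst := by
  intro BWT i _ hpre
  unfold Spec_LastToFirst
  unfold Pre_LastToFirst PySem.Raise.InRange at hpre
  unfold LastToFirst LastToFirst_alt
  simp only [pv_foldA BWT.toList, pv_lastl_eq BWT.toList]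
  have hlen : ((pvTags BWT.toList).flatMap (pvG BWT.toList)).length = BWT.toList.length :=
    pv_lastl_len BWT.toList
  by_cases hi : 0 ≤ i
  · -- i >= 0
    rw [if_pos hi]
    have hklt : i.toNat < BWT.toList.length := by omega
    rw [PySem.List.pyGetD_eq_getElem _ _ hi (by rw [hlen]; exact_mod_cast hpre.2)]
    rw [PySem.List.pyGetD_eq_getElem _ _ hi (by exact_mod_cast hpre.2)]
    rw [pv_lastl_at' BWT.toList i.toNat hklt (by omega)]
    rw [pv_foldB (BWT.toList[i.toNat]) i hi BWT.toList]
    push_cast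
    ring
  · -- i < 0
    rw [if_neg (by omega)]
    have h0j : (0 : Int) ≤ i + BWT.toList.length := by omega
    have hjlt : i + (BWT.toList.length : Int) < BWT.toList.length := by omega
    have hklt : (i + (BWT.toList.length : Int)).toNat < BWT.toList.length := by omega
    have hineg : i = -((((-i).toNat : Nat) : Int)) := by omega
    have hle : (-i).toNat ≤ ((pvTags BWT.toList).flatMap (pvG BWT.toList)).length := by omega
    conv_lhs => rw [hineg]
    rw [PySem.List.pyGetD_neg_natCast _ _ _ (by omega) hle]
    have hidx : ((pvTags BWT.toList).flatMap (pvG BWT.toList)).length - (-i).toNat =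
        (i + (BWT.toList.length : Int)).toNat := by omega
    rw [pv_foldB (PySem.List.pyGetD BWT.toList (i + (BWT.toList.length : Int)) ' ')
      (i + (BWT.toList.length : Int)) h0j BWT.toList]
    rw [PySem.List.pyGetD_eq_getElem _ _ h0j hjlt]
    simp only [hidx]
    rw [pv_lastl_at' BWT.toList _ hklt (by omega)]
    push_cast
    ring
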